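-- pv_equiv track=rewrite | github.com/ChuckWoodraska/AdventOfCode | 2019/day4/day4.py | check_number
-- ===== SOURCE A (Python) =====
-- def check_number(num):
--     num = str(num)
--     dup_check = False
--     ascend_check = True
--     for c in range(0, len(num) - 1):
--         if num[c] == num[c + 1]:
--             dup_check = True
--         elif num[c] > num[c + 1]:
--             ascend_check = False
--     if dup_check and ascend_check:
--         return True
--     else:
--         return False
-- ===== SOURCE B (Python) =====
-- def check_number(num):
--     num = str(num)
--     return list(num) == sorted(num) and len(set(num)) < len(num)
-- ===== Notes on version B (the rewrite author's own statement) =====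
-- stated objective: simpler
-- what changed: Replaces the index loop with two accumulator flags by a sort-and-set formulation: digits non-descending iff the string equals its sorted characters, and a repeated digit exists iff the character set is smaller; any duplicate is adjacent once the digits are non-descending.
import Mathlib
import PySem

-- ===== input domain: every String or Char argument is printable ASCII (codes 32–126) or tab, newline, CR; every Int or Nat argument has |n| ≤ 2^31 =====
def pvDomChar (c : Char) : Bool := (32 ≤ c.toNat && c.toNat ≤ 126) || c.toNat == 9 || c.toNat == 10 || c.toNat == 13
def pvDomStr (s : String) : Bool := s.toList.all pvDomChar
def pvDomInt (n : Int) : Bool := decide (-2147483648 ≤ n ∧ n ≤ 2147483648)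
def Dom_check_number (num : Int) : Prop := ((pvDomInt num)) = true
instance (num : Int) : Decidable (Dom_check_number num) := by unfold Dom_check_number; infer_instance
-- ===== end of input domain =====

-- B replaces A's index loop with two flags by a sort-and-set formulation (simpler, not faster).

-- ===== PORT A =====
def check_number (num : Int) : Bool :=
  let s := PySem.Int.toChars num
  let st := (PySem.List.pyRange 0 ((s.length : Int) - 1) 1).foldl
    (fun (st : Bool × Bool) c =>
      if PySem.List.pyGetD s c ' ' = PySem.List.pyGetD s (c+1) ' ' then (true, st.2)
      else if PySem.List.pyGetD s c ' ' > PySem.List.pyGetD s (c+1) ' ' then (st.1, false)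
      else st)
    ((false, true) : Bool × Bool)
  st.1 && st.2

-- ===== PORT B =====
def check_number_alt (num : Int) : Bool :=
  let s := PySem.Int.toChars num
  decide (s = PySem.List.sorted s (fun x => x) false) &&
    decide ((PySem.Set.ofList s).length < s.length)

-- ===== PRECONDITION & SPEC =====
def Spec_check_number (num : Int) (out : Bool) : Prop := out = check_number_alt num
instance (num : Int) (out : Bool) : Decidable (Spec_check_number num out) := by unfold Spec_check_number; infer_instance

-- ===== CLAIM (what is proved, stated in full; the proofs are below) =====
def Claim_equal_check_number : Prop := ∀ (num : Int), Dom_check_number num → Spec_check_number num (check_number num)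

-- ===== LEMMAS AND PROOFS =====

-- adjacent-pair views of A's loop
def adjEq (s : List Char) : Bool := (s.zip s.tail).any (fun p => p.1 == p.2)
def adjLe (s : List Char) : Bool := (s.zip s.tail).all (fun p => decide (p.1 ≤ p.2))

def pairStep (st : Bool × Bool) (p : Char × Char) : Bool × Bool :=
  if p.1 = p.2 then (true, st.2) else if p.1 > p.2 then (st.1, false) else st

theorem foldl_pairStep (ps : List (Char × Char)) (st : Bool × Bool) :
    ps.foldl pairStep st
      = (st.1 || ps.any (fun p => p.1 == p.2), st.2 && ps.all (fun p => decide (p.1 ≤ p.2))) := by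
  induction ps generalizing st with
  | nil => simp
  | cons p ps ih =>
    simp only [List.foldl_cons, List.any_cons, List.all_cons, ih]
    by_cases h1 : p.1 = p.2
    · simp [pairStep, h1]
    · by_cases h2 : p.2 < p.1
      · simp [pairStep, h1, h2, not_le_of_gt h2, Bool.beq_eq_decide_eq]
      · simp [pairStep, h1, h2, le_of_not_gt h2, Bool.beq_eq_decide_eq]

theorem fold_range_eq_zip (s : List Char) (st : Bool × Bool) :
    (PySem.List.pyRange 0 ((s.length : Int) - 1) 1).foldl
      (fun (st : Bool × Bool) c =>
        if PySem.List.pyGetD s c ' ' = PySem.List.pyGetD s (c+1) ' ' then (true, st.2)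
        else if PySem.List.pyGetD s c ' ' > PySem.List.pyGetD s (c+1) ' ' then (st.1, false)
        else st) st
      = (s.zip s.tail).foldl pairStep st := by
  cases s with
  | nil => rw [PySem.List.pyRange_one_eq_nil (by simp)]; simp
  | cons a t =>
    have hlen : ((((a :: t).zip (a :: t).tail).length : Nat) : Int)
        = ((a :: t).length : Int) - 1 := by
      simp [List.length_zip]
    rw [← hlen]
    rw [PySem.List.foldl_congr_mem _ _ (fun (st : Bool × Bool) c =>
      pairStep st (PySem.List.pyGetD ((a :: t).zip (a :: t).tail) c (' ', ' '))) st ?_]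
    · exact PySem.List.foldl_pyRange_zero_pyGetD ((a :: t).zip (a :: t).tail) (' ', ' ')
        pairStep st
    · intro st' c hc
      rw [PySem.List.mem_pyRange_one] at hc
      have h0 : 0 ≤ c := hc.1
      have h2 : c < ((((a :: t).zip (a :: t).tail).length : Nat) : Int) := hc.2
      have h1 : c + 1 < (((a :: t).length : Nat) : Int) := by
        simp only [List.length_zip, List.tail_cons, List.length_cons] at h2 ⊢
        push_cast at h2 ⊢
        omega
      rw [PySem.List.pyGetD_eq_getElem (a :: t) ' ' h0 (by omega),
          PySem.List.pyGetD_eq_getElem (a :: t) ' ' (by omega) h1]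
      have ht : (c + 1).toNat = c.toNat + 1 := by omega
      simp only [PySem.List.pyGetD_eq_getElem ((a :: t).zip (a :: t).tail) (' ', ' ') h0 h2,
        List.getElem_zip, List.getElem_tail, pairStep, ht]

theorem check_number_eq_adj (num : Int) :
    check_number num = (adjEq (PySem.Int.toChars num) && adjLe (PySem.Int.toChars num)) := by
  simp only [check_number]
  rw [fold_range_eq_zip, foldl_pairStep]
  simp [adjEq, adjLe]

-- membership in the adjacent-pairs zip, in index form
theorem zip_tail_forall {P : Char × Char → Prop} (s : List Char) :
    (∀ p ∈ s.zip s.tail, P p) ↔ ∀ (i : Nat) (h : i + 1 < s.length), P (s[i], s[i+1]) := by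
  constructor
  · intro h i hi
    have hz : i < (s.zip s.tail).length := by simp [List.length_zip]; omega
    have := h (s.zip s.tail)[i] (List.getElem_mem hz)
    rwa [List.getElem_zip, List.getElem_tail] at this
  · intro h p hp
    obtain ⟨i, hi, rfl⟩ := List.mem_iff_getElem.mp hp
    have hi' : i + 1 < s.length := by simp [List.length_zip] at hi; omega
    rw [List.getElem_zip, List.getElem_tail]
    exact h i hi'

theorem adjLe_iff (s : List Char) : adjLe s = true ↔ s.Pairwise (· ≤ ·) := by
  rw [adjLe, List.all_eq_true, zip_tail_forall (P := fun p => decide (p.1 ≤ p.2) = true),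
    ← List.isChain_iff_pairwise]
  rw [List.isChain_iff_getElem]
  simp

theorem adjEq_false_iff (s : List Char) :
    adjEq s = false ↔ ∀ (i : Nat) (h : i + 1 < s.length), s[i] ≠ s[i+1] := by
  rw [adjEq, List.any_eq_false, zip_tail_forall (P := fun p => ¬ (p.1 == p.2) = true)]
  simp

theorem sorted_eq_iff (s : List Char) :
    (s = PySem.List.sorted s (fun x => x) false) ↔ s.Pairwise (· ≤ ·) := by
  constructor
  · intro h
    have := PySem.List.sorted_pairwise s (fun x => x)
    rw [← h] at this
    exact this
  · intro h
    exact (PySem.List.sorted_eq_self_of_pairwise s (fun x => x) h).symm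

theorem ofList_sublist (xs : List Char) : List.Sublist (PySem.Set.ofList xs) xs := by
  induction xs using List.reverseRecOn with
  | nil => simp [PySem.Set.ofList_nil]
  | append_singleton xs x ih =>
    rw [PySem.Set.ofList_append_singleton, PySem.Set.add_eq_ite]
    split
    · exact ih.trans (List.sublist_append_left xs [x])
    · exact ih.append_right [x]

theorem ofList_lt_iff (xs : List Char) :
    (PySem.Set.ofList xs).length < xs.length ↔ ¬ xs.Nodup := by
  constructor
  · intro h hnd
    rw [PySem.Set.ofList_eq_self_of_nodup xs hnd] at h
    omega
  · intro hnd
    have hle := PySem.Set.length_ofList_le xs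
    rcases lt_or_eq_of_le hle with h | h
    · exact h
    · exact absurd ((ofList_sublist xs).eq_of_length h ▸ PySem.Set.nodup_ofList xs) hnd

theorem adj_eq_sorted_set (s : List Char) :
    (adjEq s && adjLe s)
      = (decide (s = PySem.List.sorted s (fun x => x) false)
          && decide ((PySem.Set.ofList s).length < s.length)) := by
  by_cases hle : adjLe s = true
  · have hpw := (adjLe_iff s).mp hle
    rw [hle, Bool.and_true, decide_eq_true ((sorted_eq_iff s).mpr hpw), Bool.true_and]
    cases heq : adjEq s with
    | false =>
      have hnd : s.Nodup := by
        have hne := (adjEq_false_iff s).mp heq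
        have hchain : s.IsChain (· < ·) := by
          rw [List.isChain_iff_getElem]
          intro i hi
          have hle' := List.isChain_iff_getElem.mp ((List.isChain_iff_pairwise).mpr hpw) i hi
          exact lt_of_le_of_ne hle' (hne i hi)
        exact (hchain.pairwise.imp (fun h => ne_of_lt h))
      simp [ofList_lt_iff, hnd]
    | true =>
      have : ¬ s.Nodup := by
        intro hnd
        have hchain : s.IsChain (· ≠ ·) := List.Pairwise.isChain hnd
        have := (adjEq_false_iff s).mpr (fun i hi => List.isChain_iff_getElem.mp hchain i hi)
        rw [heq] at this; exact Bool.true_eq_false.mp this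
      simp [ofList_lt_iff, this]
  · rw [Bool.not_eq_true] at hle
    rw [hle, Bool.and_false]
    have : ¬ (s = PySem.List.sorted s (fun x => x) false) := by
      intro h
      have := (adjLe_iff s).mpr ((sorted_eq_iff s).mp h)
      rw [hle] at this; exact Bool.false_eq_true.mp this
    simp [this]

-- ===== VERDICT (by name: the statement is the Claim_ definition above) =====
theorem check_number_spec : Claim_equal_check_number := by
  intro num _
  unfold Spec_check_number check_number_alt
  rw [check_number_eq_adj, adj_eq_sorted_set]
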